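-- pv_equiv track=rewrite | github.com/Amitro123/project-rules-generator | generator/rules_creator.py | _identify_priority_areas
-- ===== SOURCE A (Python) =====
-- from typing import Dict, List, Optional, Set, Tuple
--
-- def _identify_priority_areas(tech_stack: List[str], project_type: str) -> List[str]:
--     """Identify high-priority areas for this project."""
--     priorities = []
--
--     # From tech stack
--     if "fastapi" in tech_stack or "flask" in tech_stack:
--         priorities.append("rest_api_patterns")
--         priorities.append("async_operations")
--
--     if "react" in tech_stack:
--         priorities.append("hooks_patterns")
--         priorities.append("state_management")
--
--     if "asyncio" in tech_stack or "fastapi" in tech_stack: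
--         priorities.append("async_coordination")
--
--     if "docker" in tech_stack:
--         priorities.append("containerization")
--
--     if "pytest" in tech_stack or "jest" in tech_stack:
--         priorities.append("test_coverage")
--
--     if "openai" in tech_stack or "anthropic" in tech_stack:
--         priorities.append("llm_integration")
--
--     # AI/LLM providers (broader coverage)
--     if any(t in tech_stack for t in ("gemini", "groq", "claude", "langchain", "llm")):
--         priorities.append("llm_integration")
--
--     # CLI tools
--     if any(t in tech_stack for t in ("click", "typer", "argparse")):
--         priorities.append("cli_ux_patterns")
--
--     # Data validation
--     if any(t in tech_stack for t in ("pydantic", "marshmallow")):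
--         priorities.append("data_validation")
--
--     # Project type fallbacks
--     if project_type == "python-cli" and not priorities:
--         priorities.extend(["cli_ux_patterns", "error_handling"])
--     elif project_type == "python-library" and not priorities:
--         priorities.extend(["test_coverage", "api_design"])
--
--     return list(dict.fromkeys(priorities))  # deduplicate, preserve order
-- ===== SOURCE B (Python) =====
-- _TOKEN_OUTPUTS = {
--     "fastapi": ("rest_api_patterns", "async_operations", "async_coordination"),
--     "flask": ("rest_api_patterns", "async_operations"),
--     "react": ("hooks_patterns", "state_management"),
--     "asyncio": ("async_coordination",),
--     "docker": ("containerization",),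
--     "pytest": ("test_coverage",),
--     "jest": ("test_coverage",),
--     "openai": ("llm_integration",),
--     "anthropic": ("llm_integration",),
--     "gemini": ("llm_integration",),
--     "groq": ("llm_integration",),
--     "claude": ("llm_integration",),
--     "langchain": ("llm_integration",),
--     "llm": ("llm_integration",),
--     "click": ("cli_ux_patterns",),
--     "typer": ("cli_ux_patterns",),
--     "argparse": ("cli_ux_patterns",),
--     "pydantic": ("data_validation",),
--     "marshmallow": ("data_validation",),
-- }
--
-- _ORDER = [
--     "rest_api_patterns", "async_operations", "hooks_patterns",
--     "state_management", "async_coordination", "containerization",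
--     "test_coverage", "llm_integration", "cli_ux_patterns", "data_validation",
-- ]
--
-- def _collect_hits(tech_stack):
--     hit = set()
--     for t in tech_stack:
--         hit.update(_TOKEN_OUTPUTS.get(t, ()))
--     return hit
--
-- def _identify_priority_areas(tech_stack, project_type):
--     hit = _collect_hits(tech_stack)
--     out = [p for p in _ORDER if p in hit]
--     if not out:
--         if project_type == "python-cli":
--             out = ["cli_ux_patterns", "error_handling"]
--         elif project_type == "python-library":
--             out = ["test_coverage", "api_design"]
--     return out
-- ===== Notes on version B (the rewrite author's own statement) =====
-- stated objective: alternative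
-- what changed: B inverts the data flow: instead of testing each rule's condition against the stack, it makes one pass over tech_stack collecting triggered outputs into a set via a token-to-outputs dict, then emits the result by filtering a fixed canonical-order list (so no dedup pass is needed), with the two project-type fallbacks applied when nothing was collected.
import Mathlib
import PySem

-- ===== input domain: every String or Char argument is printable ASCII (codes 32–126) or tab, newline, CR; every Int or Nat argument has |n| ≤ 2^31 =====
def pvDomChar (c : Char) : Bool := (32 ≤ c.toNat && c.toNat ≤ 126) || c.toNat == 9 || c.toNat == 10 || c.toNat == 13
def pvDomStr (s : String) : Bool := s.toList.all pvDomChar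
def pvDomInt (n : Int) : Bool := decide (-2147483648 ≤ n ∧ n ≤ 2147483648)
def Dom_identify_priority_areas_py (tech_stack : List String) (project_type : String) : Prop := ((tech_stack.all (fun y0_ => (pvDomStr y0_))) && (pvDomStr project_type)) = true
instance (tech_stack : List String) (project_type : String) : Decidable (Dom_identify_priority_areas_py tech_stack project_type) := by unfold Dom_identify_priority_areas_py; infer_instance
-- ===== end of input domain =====

-- B inverts the data flow: one pass over tech_stack collecting triggered outputs into a set through a
-- token→outputs map, then emitting them by filtering a fixed canonical order list (one scan of the stack
-- instead of one scan per rule); objective: alternative.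
-- ===== PORT A =====
def identify_priority_areas_py (tech_stack : List String) (project_type : String) : List String :=
  let priorities : List String := []
  let priorities := if "fastapi" ∈ tech_stack ∨ "flask" ∈ tech_stack then
      priorities ++ ["rest_api_patterns"] ++ ["async_operations"] else priorities
  let priorities := if "react" ∈ tech_stack then
      priorities ++ ["hooks_patterns"] ++ ["state_management"] else priorities
  let priorities := if "asyncio" ∈ tech_stack ∨ "fastapi" ∈ tech_stack then
      priorities ++ ["async_coordination"] else priorities
  let priorities := if "docker" ∈ tech_stack then
      priorities ++ ["containerization"] else priorities
  let priorities := if "pytest" ∈ tech_stack ∨ "jest" ∈ tech_stack then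
      priorities ++ ["test_coverage"] else priorities
  let priorities := if "openai" ∈ tech_stack ∨ "anthropic" ∈ tech_stack then
      priorities ++ ["llm_integration"] else priorities
  let priorities := if (["gemini", "groq", "claude", "langchain", "llm"].any (fun t => t ∈ tech_stack)) then
      priorities ++ ["llm_integration"] else priorities
  let priorities := if (["click", "typer", "argparse"].any (fun t => t ∈ tech_stack)) then
      priorities ++ ["cli_ux_patterns"] else priorities
  let priorities := if (["pydantic", "marshmallow"].any (fun t => t ∈ tech_stack)) then
      priorities ++ ["data_validation"] else priorities
  let priorities := if project_type = "python-cli" ∧ priorities = [] then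
      priorities ++ ["cli_ux_patterns", "error_handling"]
    else if project_type = "python-library" ∧ priorities = [] then
      priorities ++ ["test_coverage", "api_design"]
    else priorities
  PySem.List.dedup priorities

-- ===== PORT B =====
-- the token → outputs map of B (_TOKEN_OUTPUTS)
def pvPairs : List (String × List String) :=
[ ("fastapi", ["rest_api_patterns", "async_operations", "async_coordination"]),
    ("flask", ["rest_api_patterns", "async_operations"]),
    ("react", ["hooks_patterns", "state_management"]),
    ("asyncio", ["async_coordination"]),
    ("docker", ["containerization"]),
    ("pytest", ["test_coverage"]),
    ("jest", ["test_coverage"]),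
    ("openai", ["llm_integration"]),
    ("anthropic", ["llm_integration"]),
    ("gemini", ["llm_integration"]),
    ("groq", ["llm_integration"]),
    ("claude", ["llm_integration"]),
    ("langchain", ["llm_integration"]),
    ("llm", ["llm_integration"]),
    ("click", ["cli_ux_patterns"]),
    ("typer", ["cli_ux_patterns"]),
    ("argparse", ["cli_ux_patterns"]),
    ("pydantic", ["data_validation"]),
    ("marshmallow", ["data_validation"]) ]

def pvTokenOutputs : PySem.Dict String (List String) := PySem.Dict.ofList pvPairs

-- the canonical emission order of B (_ORDER)
def pvOrder : List String :=
  [ "rest_api_patterns", "async_operations", "hooks_patterns",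
    "state_management", "async_coordination", "containerization",
    "test_coverage", "llm_integration", "cli_ux_patterns", "data_validation" ]

-- _collect_hits: one pass over tech_stack, hit.update(_TOKEN_OUTPUTS.get(t, ()))
def pvCollectHits (tech_stack : List String) : PySem.Set String :=
  tech_stack.foldl
    (fun hit t => PySem.Set.update hit (PySem.Dict.getD pvTokenOutputs t []))
    PySem.Set.empty

def identify_priority_areas_py_alt (tech_stack : List String) (project_type : String) : List String :=
  let hit := pvCollectHits tech_stack
  let out := pvOrder.filter (fun p => PySem.Set.contains hit p)
  if out = [] then
    if project_type = "python-cli" then ["cli_ux_patterns", "error_handling"]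
    else if project_type = "python-library" then ["test_coverage", "api_design"]
    else out
  else out

-- ===== PRECONDITION & SPEC =====
def Spec_identify_priority_areas_py (tech_stack : List String) (project_type : String) (out : List String) : Prop := out = identify_priority_areas_py_alt tech_stack project_type
instance (tech_stack : List String) (project_type : String) (out : List String) : Decidable (Spec_identify_priority_areas_py tech_stack project_type out) := by unfold Spec_identify_priority_areas_py; infer_instance

-- ===== CLAIM (what is proved, stated in full; the proofs are below) =====
def Claim_equal_identify_priority_areas_py : Prop := ∀ (tech_stack : List String) (project_type : String), Dom_identify_priority_areas_py tech_stack project_type → Spec_identify_priority_areas_py tech_stack project_type (identify_priority_areas_py tech_stack project_type)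

-- ===== LEMMAS AND PROOFS =====
theorem pv_mem_update (s : PySem.Set String) (l : List String) (p : String) :
    p ∈ PySem.Set.update s l ↔ p ∈ s ∨ p ∈ l := by
  induction l generalizing s with
  | nil => simp [PySem.Set.update]
  | cons x xs ih =>
    simp [PySem.Set.update] at ih ⊢
    rw [ih, PySem.Set.mem_add]
    tauto

theorem pv_mem_collect (ts : List String) (p : String) :
    p ∈ pvCollectHits ts ↔ ∃ t ∈ ts, p ∈ PySem.Dict.getD pvTokenOutputs t [] := by
  have aux : ∀ (l : List String) (s : PySem.Set String),
      p ∈ l.foldl (fun hit t => PySem.Set.update hit (PySem.Dict.getD pvTokenOutputs t [])) s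
        ↔ p ∈ s ∨ ∃ t ∈ l, p ∈ PySem.Dict.getD pvTokenOutputs t [] := by
    intro l
    induction l with
    | nil => simp
    | cons x xs ih =>
      intro s
      simp only [List.foldl_cons, ih, pv_mem_update, List.mem_cons]
      constructor
      · rintro ((h | h) | ⟨t, ht, hp⟩)
        · exact Or.inl h
        · exact Or.inr ⟨x, Or.inl rfl, h⟩
        · exact Or.inr ⟨t, Or.inr ht, hp⟩
      · rintro (h | ⟨t, (rfl | ht), hp⟩)
        · exact Or.inl (Or.inl h)
        · exact Or.inl (Or.inr hp)
        · exact Or.inr ⟨t, ht, hp⟩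
  rw [pvCollectHits, aux]
  simp [PySem.Set.empty]

theorem pv_contains_iff (s : PySem.Set String) (p : String) :
    PySem.Set.contains s p = true ↔ p ∈ s := by
  simp [PySem.Set.contains]

-- pvPairs has pairwise distinct keys, so building the dict from it keeps it as the item list
set_option maxHeartbeats 2000000 in
theorem pv_mk : pvTokenOutputs = PySem.Dict.mk pvPairs := by decide

-- first-match lookup in a dict with distinct keys is plain association-list search
theorem pv_mem_getD (p t : String) (l : List (String × List String))
    (hl : (l.map Prod.fst).Nodup) :
    p ∈ (PySem.Dict.mk l).getD t [] ↔ ∃ pr, pr ∈ l ∧ pr.1 = t ∧ p ∈ pr.2 := by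
  induction l with
  | nil => simp [PySem.Dict.getD, PySem.Dict.get?]
  | cons a rest ih =>
    obtain ⟨k, v⟩ := a
    simp only [List.map_cons, List.nodup_cons] at hl
    obtain ⟨hk_notin, hnd⟩ := hl
    by_cases hk : k = t
    · subst hk
      simp only [PySem.Dict.getD, PySem.Dict.get?_mk_cons, BEq.rfl, if_true, Option.getD_some]
      constructor
      · intro hp; exact ⟨(k, v), List.mem_cons_self .., rfl, hp⟩
      · rintro ⟨⟨k', v'⟩, hpr, h1, h2⟩
        rcases List.mem_cons.mp hpr with h | h
        · cases h; exact h2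
        · exfalso; apply hk_notin; subst h1
          exact List.mem_map.mpr ⟨(k', v'), h, rfl⟩
    · have hkb : (k == t) = false := by simpa using hk
      simp only [PySem.Dict.getD, PySem.Dict.get?_mk_cons, hkb, Bool.false_eq_true, if_false]
      rw [show ((PySem.Dict.mk rest).get? t).getD [] = (PySem.Dict.mk rest).getD t [] from rfl]
      rw [ih hnd]
      constructor
      · rintro ⟨pr, h, h1, h2⟩; exact ⟨pr, List.mem_cons_of_mem _ h, h1, h2⟩
      · rintro ⟨pr, hpr, h1, h2⟩
        rcases List.mem_cons.mp hpr with h | h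
        · exfalso; apply hk; rw [h] at h1; exact h1
        · exact ⟨pr, h, h1, h2⟩

theorem pv_lk (p t : String) :
    (p ∈ PySem.Dict.getD pvTokenOutputs t []) ↔ ∃ pr, pr ∈ pvPairs ∧ pr.1 = t ∧ p ∈ pr.2 := by
  rw [pv_mk]; exact pv_mem_getD p t pvPairs (by decide)

theorem pv_hit_rest (ts : List String) :
    ("rest_api_patterns" ∈ pvCollectHits ts) ↔ ("fastapi" ∈ ts ∨ "flask" ∈ ts) := by
  rw [pv_mem_collect]; simp [pv_lk, pvPairs, and_or_left, exists_or]

theorem pv_hit_asyncop (ts : List String) :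
    ("async_operations" ∈ pvCollectHits ts) ↔ ("fastapi" ∈ ts ∨ "flask" ∈ ts) := by
  rw [pv_mem_collect]; simp [pv_lk, pvPairs, and_or_left, exists_or]

theorem pv_hit_hooks (ts : List String) :
    ("hooks_patterns" ∈ pvCollectHits ts) ↔ ("react" ∈ ts) := by
  rw [pv_mem_collect]; simp [pv_lk, pvPairs]

theorem pv_hit_state (ts : List String) :
    ("state_management" ∈ pvCollectHits ts) ↔ ("react" ∈ ts) := by
  rw [pv_mem_collect]; simp [pv_lk, pvPairs]

theorem pv_hit_coord (ts : List String) :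
    ("async_coordination" ∈ pvCollectHits ts) ↔ ("asyncio" ∈ ts ∨ "fastapi" ∈ ts) := by
  rw [pv_mem_collect]; simp [pv_lk, pvPairs, and_or_left, exists_or]; tauto

theorem pv_hit_cont (ts : List String) :
    ("containerization" ∈ pvCollectHits ts) ↔ ("docker" ∈ ts) := by
  rw [pv_mem_collect]; simp [pv_lk, pvPairs]

theorem pv_hit_test (ts : List String) :
    ("test_coverage" ∈ pvCollectHits ts) ↔ ("pytest" ∈ ts ∨ "jest" ∈ ts) := by
  rw [pv_mem_collect]; simp [pv_lk, pvPairs, and_or_left, exists_or]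

theorem pv_hit_llm (ts : List String) :
    ("llm_integration" ∈ pvCollectHits ts) ↔
      (("openai" ∈ ts ∨ "anthropic" ∈ ts) ∨ ("gemini" ∈ ts ∨ "groq" ∈ ts ∨ "claude" ∈ ts ∨ "langchain" ∈ ts ∨ "llm" ∈ ts)) := by
  rw [pv_mem_collect]; simp [pv_lk, pvPairs, and_or_left, exists_or]; tauto

theorem pv_hit_cli (ts : List String) :
    ("cli_ux_patterns" ∈ pvCollectHits ts) ↔ ("click" ∈ ts ∨ "typer" ∈ ts ∨ "argparse" ∈ ts) := by
  rw [pv_mem_collect]; simp [pv_lk, pvPairs, and_or_left, exists_or]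

theorem pv_hit_val (ts : List String) :
    ("data_validation" ∈ pvCollectHits ts) ↔ ("pydantic" ∈ ts ∨ "marshmallow" ∈ ts) := by
  rw [pv_mem_collect]; simp [pv_lk, pvPairs, and_or_left, exists_or]

-- pull the common prefix out of a guarded append/cons, so both chains flatten without duplication
theorem pv_pull {α : Type} (c : Prop) [Decidable c] (x a : List α) :
    (if c then x ++ a else x) = x ++ (if c then a else []) := by split_ifs <;> simp

theorem pv_pull2 {α : Type} (c : Prop) [Decidable c] (x a b : List α) :
    (if c then (x ++ a) ++ b else x) = x ++ (if c then a ++ b else []) := by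
  split_ifs <;> simp

theorem pv_filter_cons {α : Type} (p : α → Bool) (x : α) (xs : List α) :
    List.filter p (x :: xs) = (if p x = true then [x] else []) ++ List.filter p xs := by
  rw [List.filter_cons]; split_ifs <;> simp

-- a guarded two-element segment splits into two guarded singletons
theorem pv_two {α : Type} (c : Prop) [Decidable c] (a b : α) :
    (if c then [a, b] else ([] : List α)) = (if c then [a] else []) ++ (if c then [b] else []) := by
  split_ifs <;> simp

theorem pv_ite_sub (c : Prop) [Decidable c] (a : String) :
    List.Sublist (if c then [a] else []) [a] := by split_ifs <;> simp

theorem pv_dedup_nodup (xs : List String) (h : xs.Nodup) : PySem.List.dedup xs = xs := by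
  have aux : ∀ (l : List String), l.Nodup → ∀ (s : PySem.Set String), (∀ x ∈ l, x ∉ s) →
      List.foldl PySem.Set.add s l = s ++ l := by
    intro l
    induction l with
    | nil => intro _ s _; simp
    | cons x t ih =>
      intro hnd s hs
      simp only [List.nodup_cons] at hnd
      rw [List.foldl_cons, PySem.Set.add_of_not_mem (hs x (List.mem_cons_self ..)),
        ih hnd.2 (s ++ [x]) ?_]
      · simp
      · intro y hy
        simp only [List.mem_append, List.mem_singleton]
        rintro (h1 | rfl)
        · exact hs y (List.mem_cons_of_mem _ hy) h1
        · exact hnd.1 hy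
  rw [PySem.List.dedup, PySem.Set.ofList_eq_foldl, aux xs h [] (by simp)]
  simp

theorem pv_dedup_nil (xs : List String) : PySem.List.dedup xs = [] ↔ xs = [] := by
  cases xs with
  | nil => simp [PySem.List.dedup, PySem.Set.ofList]
  | cons x t =>
    constructor
    · intro h
      have hx : x ∈ PySem.List.dedup (x :: t) := by
        rw [PySem.List.mem_dedup]; exact List.mem_cons_self ..
      rw [h] at hx
      exact absurd hx (List.not_mem_nil)
    · intro h; cases h

-- collapsing an adjacent duplicate under dedup (seven abstract prefix segments, as in A's chain)
theorem pv_collapse (s1 s2 s3 s4 s5 s6 s7 : List String) (l : String) (R : List String) :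
    PySem.List.dedup (s1 ++ (s2 ++ (s3 ++ (s4 ++ (s5 ++ (s6 ++ (s7 ++ (l :: (l :: R)))))))))
      = PySem.List.dedup (s1 ++ (s2 ++ (s3 ++ (s4 ++ (s5 ++ (s6 ++ (s7 ++ (l :: R)))))))) := by
  simp only [PySem.List.dedup, PySem.Set.ofList_eq_foldl, List.foldl_append, List.foldl_cons]
  rw [PySem.Set.add_of_mem ((PySem.Set.mem_add _ _ _).mpr (Or.inr rfl))]

-- A's two llm_integration appends merge into one guarded by the disjunction
theorem pv_merge (s1 s2 s3 s4 s5 s6 s7 : List String) (c6 c7 : Prop) [Decidable c6] [Decidable c7]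
    (l : String) (R : List String) :
    PySem.List.dedup (s1 ++ (s2 ++ (s3 ++ (s4 ++ (s5 ++ (s6 ++ (s7 ++
        ((if c6 then [l] else []) ++ ((if c7 then [l] else []) ++ R)))))))))
      = PySem.List.dedup (s1 ++ (s2 ++ (s3 ++ (s4 ++ (s5 ++ (s6 ++ (s7 ++
        ((if c6 ∨ c7 then [l] else []) ++ R)))))))) := by
  by_cases h6 : c6 <;> by_cases h7 : c7 <;> simp only [h6, h7, if_false, or_true,
    or_false, if_pos, List.singleton_append, List.nil_append]
  exact pv_collapse s1 s2 s3 s4 s5 s6 s7 l R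

-- the deduplicated tech-stack chain equals B's canonical-order filter chain
theorem pv_core (C1 C2 C3 C4 C5 C6 C7 C8 C9 : Prop)
    [Decidable C1] [Decidable C2] [Decidable C3] [Decidable C4] [Decidable C5]
    [Decidable C6] [Decidable C7] [Decidable C8] [Decidable C9] :
    PySem.List.dedup
      ((if C1 then ["rest_api_patterns", "async_operations"] else []) ++
       ((if C2 then ["hooks_patterns", "state_management"] else []) ++
        ((if C3 then ["async_coordination"] else []) ++
         ((if C4 then ["containerization"] else []) ++
          ((if C5 then ["test_coverage"] else []) ++
           ((if C6 then ["llm_integration"] else []) ++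
            ((if C7 then ["llm_integration"] else []) ++
             ((if C8 then ["cli_ux_patterns"] else []) ++
              (if C9 then ["data_validation"] else [])))))))))
    = ((if C1 then ["rest_api_patterns"] else []) ++
       ((if C1 then ["async_operations"] else []) ++
        ((if C2 then ["hooks_patterns"] else []) ++
         ((if C2 then ["state_management"] else []) ++
          ((if C3 then ["async_coordination"] else []) ++
           ((if C4 then ["containerization"] else []) ++
            ((if C5 then ["test_coverage"] else []) ++
             ((if C6 ∨ C7 then ["llm_integration"] else []) ++
              ((if C8 then ["cli_ux_patterns"] else []) ++
               (if C9 then ["data_validation"] else [])))))))))) := by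
  simp only [pv_two, List.append_assoc]
  rw [pv_merge]
  refine pv_dedup_nodup _ ?_
  have hsub : List.Sublist ((if C1 then ["rest_api_patterns"] else []) ++
       ((if C1 then ["async_operations"] else []) ++
        ((if C2 then ["hooks_patterns"] else []) ++
         ((if C2 then ["state_management"] else []) ++
          ((if C3 then ["async_coordination"] else []) ++
           ((if C4 then ["containerization"] else []) ++
            ((if C5 then ["test_coverage"] else []) ++
             ((if C6 ∨ C7 then ["llm_integration"] else []) ++
              ((if C8 then ["cli_ux_patterns"] else []) ++
               (if C9 then ["data_validation"] else []))))))))))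
      (["rest_api_patterns"] ++ (["async_operations"] ++ (["hooks_patterns"] ++
       (["state_management"] ++ (["async_coordination"] ++ (["containerization"] ++
        (["test_coverage"] ++ (["llm_integration"] ++ (["cli_ux_patterns"] ++
         ["data_validation"]))))))))) :=
    (pv_ite_sub _ _).append ((pv_ite_sub _ _).append ((pv_ite_sub _ _).append
      ((pv_ite_sub _ _).append ((pv_ite_sub _ _).append ((pv_ite_sub _ _).append
        ((pv_ite_sub _ _).append ((pv_ite_sub _ _).append ((pv_ite_sub _ _).append
          (pv_ite_sub _ _)))))))))
  exact List.Nodup.sublist hsub (by decide)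

-- the two emptiness-gated fallback tails agree once the chains agree
theorem pv_tail (Q1 Q2 : Prop) [Decidable Q1] [Decidable Q2]
    (s1 s2 s3 s4 s5 s6 s7 s8 s9 RC : List String)
    (hchain : PySem.List.dedup (s1 ++ (s2 ++ (s3 ++ (s4 ++ (s5 ++ (s6 ++ (s7 ++ (s8 ++ s9)))))))) = RC) :
    PySem.List.dedup
      (if Q1 ∧ (s1 ++ (s2 ++ (s3 ++ (s4 ++ (s5 ++ (s6 ++ (s7 ++ (s8 ++ s9)))))))) = []
       then s1 ++ (s2 ++ (s3 ++ (s4 ++ (s5 ++ (s6 ++ (s7 ++ (s8 ++ (s9 ++ ["cli_ux_patterns", "error_handling"]))))))))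
       else s1 ++ (s2 ++ (s3 ++ (s4 ++ (s5 ++ (s6 ++ (s7 ++ (s8 ++ (s9 ++
         (if Q2 ∧ (s1 ++ (s2 ++ (s3 ++ (s4 ++ (s5 ++ (s6 ++ (s7 ++ (s8 ++ s9)))))))) = []
          then ["test_coverage", "api_design"] else []))))))))))
    = (if RC = [] then (if Q1 then ["cli_ux_patterns", "error_handling"]
        else if Q2 then ["test_coverage", "api_design"] else RC) else RC) := by
  have hnil : (s1 ++ (s2 ++ (s3 ++ (s4 ++ (s5 ++ (s6 ++ (s7 ++ (s8 ++ s9)))))))) = [] ↔ RC = [] := by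
    rw [← hchain, pv_dedup_nil]
  by_cases hE : (s1 ++ (s2 ++ (s3 ++ (s4 ++ (s5 ++ (s6 ++ (s7 ++ (s8 ++ s9)))))))) = []
  · have hR := hnil.mp hE
    simp only [List.append_eq_nil_iff] at hE
    obtain ⟨e1, e2, e3, e4, e5, e6, e7, e8, e9⟩ := hE
    subst e1 e2 e3 e4 e5 e6 e7 e8 e9
    simp [hR]
    split_ifs <;> decide
  · have hR : ¬(RC = []) := fun h => hE (hnil.mpr h)
    simp only [hE, hR, and_false, if_false, List.append_nil]
    exact hchain

-- ===== VERDICT (by name: the statement is the Claim_ definition above) =====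
theorem identify_priority_areas_py_spec : Claim_equal_identify_priority_areas_py := by
  intro ts pt _
  unfold Spec_identify_priority_areas_py identify_priority_areas_py identify_priority_areas_py_alt
  simp only [pv_pull2, pv_pull, pvOrder, pv_filter_cons, List.filter_nil]
  simp only [List.any_cons, List.any_nil, Bool.or_false, Bool.or_eq_true, decide_eq_true_eq,
    List.append_assoc, List.nil_append, List.append_nil, List.cons_append,
    pv_contains_iff,
    pv_hit_rest, pv_hit_asyncop, pv_hit_hooks, pv_hit_state, pv_hit_coord,
    pv_hit_cont, pv_hit_test, pv_hit_llm, pv_hit_cli, pv_hit_val]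
  apply pv_tail
  exact pv_core _ _ _ _ _ _ _ _ _
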